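-- pv_equiv track=rewrite | github.com/isaacazuelos/aoc2018 | day02/day02.py | correct_ids
-- ===== SOURCE A (Python) =====
-- def correct_ids(l, r):
--     same = ""
--     differ_count = 0
--     for cl, cr in zip(l, r):
--         if cl == cr:
--             same += cl
--         else:
--             differ_count += 1
--     if differ_count == 1:
--         return same
--     else:
--         return None
-- ===== SOURCE B (Python) =====
-- def correct_ids(l, r):
--     # Scan to the first mismatching position; the answer exists iff the
--     # remaining compared suffixes are identical, and is prefix + suffix.
--     n = min(len(l), len(r))
--     for i in range(n):
--         if l[i] != r[i]:
--             if l[i+1:n] == r[i+1:n]: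
--                 return l[:i] + l[i+1:n]
--             return None
--     return None
-- ===== Notes on version B (the rewrite author's own statement) =====
-- stated objective: faster
-- what changed: Instead of one full pass accumulating matched characters and counting all mismatches, B scans only to the first mismatching index, decides by a single suffix equality comparison, and reconstructs the answer from two slices l[:i] + l[i+1:n]; the slice comparison/concatenation runs at C speed instead of per-character string building.
import Mathlib
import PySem

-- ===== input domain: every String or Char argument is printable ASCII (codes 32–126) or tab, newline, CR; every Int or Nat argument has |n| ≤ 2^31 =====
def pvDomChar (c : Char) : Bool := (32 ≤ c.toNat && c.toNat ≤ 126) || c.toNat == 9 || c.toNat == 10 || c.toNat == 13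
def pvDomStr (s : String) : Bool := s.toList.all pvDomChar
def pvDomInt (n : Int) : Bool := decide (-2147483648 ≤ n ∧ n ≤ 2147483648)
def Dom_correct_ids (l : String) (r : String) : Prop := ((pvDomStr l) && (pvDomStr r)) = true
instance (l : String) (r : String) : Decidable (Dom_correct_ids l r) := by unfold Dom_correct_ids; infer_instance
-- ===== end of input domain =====

-- ===== PORT A =====
-- B scans to the first mismatch and decides by one suffix comparison (slice-based); proved equal to A on the domain.
def correct_ids (l : String) (r : String) : Option String :=
  -- literal port: accumulate matched chars, count mismatches, over zip(l, r)
  let st := (List.zip l.toList r.toList).foldl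
    (fun (s : List Char × Int) p =>
      if p.1 == p.2 then (s.1 ++ [p.1], s.2) else (s.1, s.2 + 1))
    ([], 0)
  if st.2 == 1 then some (String.ofList st.1) else none

-- ===== PORT B =====
-- Source B's index loop with early return, as the obvious structural recursion over the
-- two character lists (position i = chars consumed so far); on the first mismatch the
-- remaining slices l[i+1:n], r[i+1:n] are exactly the truncated tails.
def correct_ids_go : List Char → List Char → Option (List Char)
  | a :: ls, b :: rs =>
    if a == b then
      match correct_ids_go ls rs with
      | some t => some (a :: t)      -- prefix l[:i] rebuilt on the way out
      | none => none
    else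
      let m := min ls.length rs.length
      if ls.take m == rs.take m then some (ls.take m) else none
  | _, _ => none

def correct_ids_alt (l : String) (r : String) : Option String :=
  (correct_ids_go l.toList r.toList).map String.ofList

-- ===== PRECONDITION & SPEC =====
def Spec_correct_ids (l : String) (r : String) (out : Option String) : Prop := out = correct_ids_alt l r
instance (l : String) (r : String) (out : Option String) : Decidable (Spec_correct_ids l r out) := by unfold Spec_correct_ids; infer_instance

-- ===== CLAIM (what is proved, stated in full; the proofs are below) =====
def Claim_equal_correct_ids : Prop := ∀ (l : String) (r : String), Dom_correct_ids l r → Spec_correct_ids l r (correct_ids l r)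

-- ===== LEMMAS AND PROOFS =====

-- loop invariant for A: the fold computes (acc ++ matched chars, c + number of mismatches)
theorem correct_ids_fold (zs : List (Char × Char)) (acc : List Char) (c : Int) :
    zs.foldl
      (fun (s : List Char × Int) p =>
        if p.1 == p.2 then (s.1 ++ [p.1], s.2) else (s.1, s.2 + 1))
      (acc, c)
    = (acc ++ (zs.filter (fun p => p.1 == p.2)).map (fun p => p.1),
       c + ((zs.length : Int) - ((zs.filter (fun p => p.1 == p.2)).length : Int))) := by
  induction zs generalizing acc c with
  | nil => simp
  | cons z zs ih =>
    by_cases h : (z.1 == z.2) = true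
    · simp only [List.foldl_cons, List.filter_cons, h, if_true, ih, List.map_cons,
        List.length_cons]
      exact Prod.ext (by simp) (by push_cast; ring)
    · simp only [List.foldl_cons, List.filter_cons, h, ih, List.length_cons]
      exact Prod.ext rfl (by push_cast; ring)

-- zero-mismatch characterisation: every zipped pair matches iff the truncated lists are
-- equal, and then the matched characters are exactly ls.take m
theorem correct_ids_zero (ls rs : List Char) :
    (if ((ls.zip rs).filter (fun p => p.1 == p.2)).length = (ls.zip rs).length
      then some (((ls.zip rs).filter (fun p => p.1 == p.2)).map (fun p => p.1)) else none)
    = (if ls.take (min ls.length rs.length) = rs.take (min ls.length rs.length)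
        then some (ls.take (min ls.length rs.length)) else none) := by
  induction ls generalizing rs with
  | nil => simp
  | cons a ls ih =>
    cases rs with
    | nil => simp
    | cons b rs =>
      by_cases h : a = b
      · subst h
        have hih := ih rs
        simp only [List.zip_cons_cons, List.filter_cons, beq_self_eq_true, if_true,
          List.length_cons, List.map_cons, Nat.succ_min_succ, List.take_succ_cons,
          add_left_inj, List.cons.injEq, true_and]
        by_cases hz : ((ls.zip rs).filter (fun p => p.1 == p.2)).length = (ls.zip rs).length
        · rw [if_pos hz] at hih
          rw [if_pos hz]
          by_cases ht : ls.take (min ls.length rs.length) = rs.take (min ls.length rs.length)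
          · rw [if_pos ht] at hih
            rw [if_pos ht, Option.some_inj] at *
            rw [hih]
          · rw [if_neg ht] at hih
            exact absurd hih (by simp)
        · rw [if_neg hz] at hih
          rw [if_neg hz]
          by_cases ht : ls.take (min ls.length rs.length) = rs.take (min ls.length rs.length)
          · rw [if_pos ht] at hih
            exact absurd hih.symm (by simp)
          · rw [if_neg ht]
      · have hb : (a == b) = false := by simp [h]
        have hne : ¬ (a :: ls.take (min ls.length rs.length)
            = b :: rs.take (min ls.length rs.length)) := by
          simp [h]
        have hlt : ¬ (((a, b) :: ls.zip rs).filter (fun p => p.1 == p.2)).length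
            = (ls.zip rs).length + 1 := by
          have := List.length_filter_le (fun p : Char × Char => p.1 == p.2) (ls.zip rs)
          simp only [List.filter_cons, hb, Bool.false_eq_true, if_false]
          omega
        simp only [List.zip_cons_cons, List.length_cons, Nat.succ_min_succ,
          List.take_succ_cons]
        rw [if_neg hlt, if_neg hne]

-- main lemma: B's recursion equals the count-and-filter characterisation of A
theorem correct_ids_go_eq (ls rs : List Char) :
    correct_ids_go ls rs
    = (if (ls.zip rs).length = ((ls.zip rs).filter (fun p => p.1 == p.2)).length + 1
        then some (((ls.zip rs).filter (fun p => p.1 == p.2)).map (fun p => p.1)) else none) := by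
  induction ls generalizing rs with
  | nil => simp [correct_ids_go]
  | cons a ls ih =>
    cases rs with
    | nil => simp [correct_ids_go]
    | cons b rs =>
      by_cases h : a = b
      · subst h
        simp only [correct_ids_go, beq_self_eq_true, if_true, ih rs,
          List.zip_cons_cons, List.filter_cons, List.length_cons, List.map_cons,
          add_left_inj]
        by_cases hz : (ls.zip rs).length = ((ls.zip rs).filter (fun p => p.1 == p.2)).length + 1
        · rw [if_pos hz, if_pos hz]
        · rw [if_neg hz, if_neg hz]
      · have hb : (a == b) = false := by simp [h]
        have hcnt : (((a, b) :: ls.zip rs).length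
              = (((ls.zip rs).filter (fun p => p.1 == p.2)).length + 1))
            ↔ (((ls.zip rs).filter (fun p => p.1 == p.2)).length = (ls.zip rs).length) := by
          simp only [List.length_cons]
          omega
        have hfc : (((a, b) :: ls.zip rs).filter (fun p => p.1 == p.2))
            = ((ls.zip rs).filter (fun p => p.1 == p.2)) := by
          simp [hb]
        rw [show correct_ids_go (a :: ls) (b :: rs)
            = (if ls.take (min ls.length rs.length) = rs.take (min ls.length rs.length)
                then some (ls.take (min ls.length rs.length)) else none) from by
          simp only [correct_ids_go, hb, Bool.false_eq_true, if_false]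
          simp only [beq_iff_eq]]
        rw [← correct_ids_zero ls rs, List.zip_cons_cons, hfc]
        by_cases hz : ((ls.zip rs).filter (fun p => p.1 == p.2)).length = (ls.zip rs).length
        · rw [if_pos hz, if_pos (hcnt.mpr hz)]
        · rw [if_neg hz, if_neg (fun hc => hz (hcnt.mp hc))]

-- ===== VERDICT (by name: the statement is the Claim_ definition above) =====
theorem correct_ids_spec : Claim_equal_correct_ids := by
  intro l r _
  unfold Spec_correct_ids correct_ids correct_ids_alt
  rw [correct_ids_fold, correct_ids_go_eq]
  have hle := List.length_filter_le (fun p : Char × Char => p.1 == p.2)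
    (l.toList.zip r.toList)
  by_cases hn : (l.toList.zip r.toList).length
      = ((l.toList.zip r.toList).filter (fun p => p.1 == p.2)).length + 1
  · rw [if_pos hn, if_pos (beq_iff_eq.mpr (by omega))]
    simp
  · rw [if_neg hn, if_neg (by simp only [beq_iff_eq]; omega)]
    simp
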